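-- pv_equiv track=rewrite | github.com/DarsheeeGamer/KOS | kos/compute/universal_api.py | _cuda_to_hip
-- ===== SOURCE A (Python) =====
-- def _cuda_to_hip(cuda_source: str) -> str:
--     """Convert CUDA source to HIP"""
--     hip_source = cuda_source
--
--     # Basic CUDA to HIP conversions
--     replacements = {
--         'cudaMalloc': 'hipMalloc',
--         'cudaFree': 'hipFree',
--         'cudaMemcpy': 'hipMemcpy',
--         'cudaDeviceSynchronize': 'hipDeviceSynchronize',
--         'blockIdx': 'hipBlockIdx',
--         'blockDim': 'hipBlockDim',
--         'threadIdx': 'hipThreadIdx',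
--         'gridDim': 'hipGridDim',
--         '__syncthreads': '__syncthreads',
--         'cudaError_t': 'hipError_t',
--         'cudaSuccess': 'hipSuccess'
--     }
--
--     for cuda_term, hip_term in replacements.items():
--         hip_source = hip_source.replace(cuda_term, hip_term)
--
--     return hip_source
-- ===== SOURCE B (Python) =====
-- def _cuda_to_hip(cuda_source: str) -> str:
--     """Convert CUDA source to HIP"""
--     # Single left-to-right scan: at each position substitute the first
--     # matching CUDA term, instead of 11 sequential full-string passes.
--     table = [
--         ('cudaMalloc', 'hipMalloc'),
--         ('cudaFree', 'hipFree'),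
--         ('cudaMemcpy', 'hipMemcpy'),
--         ('cudaDeviceSynchronize', 'hipDeviceSynchronize'),
--         ('blockIdx', 'hipBlockIdx'),
--         ('blockDim', 'hipBlockDim'),
--         ('threadIdx', 'hipThreadIdx'),
--         ('gridDim', 'hipGridDim'),
--         ('__syncthreads', '__syncthreads'),
--         ('cudaError_t', 'hipError_t'),
--         ('cudaSuccess', 'hipSuccess'),
--     ]
--     out = []
--     i = 0
--     n = len(cuda_source)
--     while i < n:
--         for cuda_term, hip_term in table:
--             if cuda_source.startswith(cuda_term, i):
--                 out.append(hip_term)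
--                 i += len(cuda_term)
--                 break
--         else:
--             out.append(cuda_source[i])
--             i += 1
--     return ''.join(out)
-- ===== Notes on version B (the rewrite author's own statement) =====
-- stated objective: alternative
-- what changed: A makes 11 sequential full-string replace passes (one per CUDA term); B makes a single left-to-right scan over the source, substituting at each position the first matching CUDA term from the table.
-- outside the precondition, e.g. on _cuda_to_hip('cudaError_threadIdx'): A returns 'cudaError_hipThreadIdx', B returns 'hipError_threadIdx'; on _cuda_to_hip('cudaMallocudaFree'): A returns 'hipMallohipFree', B returns 'hipMallocudaFree'
import Mathlib
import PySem

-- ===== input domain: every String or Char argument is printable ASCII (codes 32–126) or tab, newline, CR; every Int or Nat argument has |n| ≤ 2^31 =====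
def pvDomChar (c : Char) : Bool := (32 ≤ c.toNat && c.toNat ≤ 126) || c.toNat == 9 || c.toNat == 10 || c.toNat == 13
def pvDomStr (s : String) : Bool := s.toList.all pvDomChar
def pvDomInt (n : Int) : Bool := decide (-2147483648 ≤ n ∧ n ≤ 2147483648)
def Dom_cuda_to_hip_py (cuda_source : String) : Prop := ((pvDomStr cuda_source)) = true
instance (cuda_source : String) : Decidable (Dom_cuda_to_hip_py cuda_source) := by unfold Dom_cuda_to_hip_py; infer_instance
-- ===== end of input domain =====

-- B replaces A's 11 sequential full-string replace passes by ONE left-to-right scan that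
-- substitutes the first matching CUDA term at each position (objective: alternative algorithm).

-- ===== PORT A =====
-- the replacements dict of A, in insertion order
def hipReplacements : List (String × String) :=
  [("cudaMalloc", "hipMalloc"),
   ("cudaFree", "hipFree"),
   ("cudaMemcpy", "hipMemcpy"),
   ("cudaDeviceSynchronize", "hipDeviceSynchronize"),
   ("blockIdx", "hipBlockIdx"),
   ("blockDim", "hipBlockDim"),
   ("threadIdx", "hipThreadIdx"),
   ("gridDim", "hipGridDim"),
   ("__syncthreads", "__syncthreads"),
   ("cudaError_t", "hipError_t"),
   ("cudaSuccess", "hipSuccess")]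

def cuda_to_hip_py (cuda_source : String) : String :=
  hipReplacements.foldl (fun hip_source p => PySem.Str.replace hip_source p.1 p.2) cuda_source

-- ===== PORT B =====
-- B's table, as code-point lists (Source B's `table`)
def hipPairs : List (List Char × List Char) :=
  [("cudaMalloc".toList, "hipMalloc".toList),
   ("cudaFree".toList, "hipFree".toList),
   ("cudaMemcpy".toList, "hipMemcpy".toList),
   ("cudaDeviceSynchronize".toList, "hipDeviceSynchronize".toList),
   ("blockIdx".toList, "hipBlockIdx".toList),
   ("blockDim".toList, "hipBlockDim".toList),
   ("threadIdx".toList, "hipThreadIdx".toList),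
   ("gridDim".toList, "hipGridDim".toList),
   ("__syncthreads".toList, "__syncthreads".toList),
   ("cudaError_t".toList, "hipError_t".toList),
   ("cudaSuccess".toList, "hipSuccess".toList)]

-- Source B's inner `for … startswith … break / else`: the first table entry matching at the
-- current position (the key-nonempty test only guards termination; all keys are nonempty)
def firstHit : List (List Char × List Char) → List Char → Option (List Char × List Char)
  | [], _ => none
  | (k, v) :: T, s => if k ≠ [] ∧ k <+: s then some (k, v) else firstHit T s

theorem firstHit_some_spec {L : List (List Char × List Char)} {s : List Char}
    {kv : List Char × List Char} (h : firstHit L s = some kv) :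
    kv.1 ≠ [] ∧ kv.1 <+: s ∧ kv ∈ L := by
  induction L with
  | nil => simp [firstHit] at h
  | cons hd tl ih =>
    obtain ⟨k, v⟩ := hd
    by_cases hc : k ≠ [] ∧ k <+: s
    · simp [firstHit, hc] at h
      subst h; exact ⟨hc.1, hc.2, by simp⟩
    · simp [firstHit, hc] at h
      rcases ih h with ⟨h1, h2, h3⟩
      exact ⟨h1, h2, by simp [h3]⟩

-- Source B's while-loop over positions, as recursion on the remaining characters
def scan (L : List (List Char × List Char)) (s : List Char) : List Char :=
  match h : firstHit L s with
  | some kv => kv.2 ++ scan L (s.drop kv.1.length)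
  | none =>
    match s with
    | [] => []
    | c :: t => c :: scan L t
termination_by s.length
decreasing_by
  · rcases firstHit_some_spec h with ⟨hne, hpre, -⟩
    have h1 : 1 ≤ kv.1.length := List.length_pos_iff.mpr hne
    have h2 : kv.1.length ≤ s.length := hpre.length_le
    have hs : s ≠ [] := by rintro rfl; exact hne (List.prefix_nil.mp hpre)
    have := List.length_pos_iff.mpr hs
    simp; omega
  · simp

def cuda_to_hip_py_alt (cuda_source : String) : String :=
  String.ofList (scan hipPairs cuda_source.toList)

-- ===== PRECONDITION & SPEC =====
-- The six strings on which A's sequential passes and B's single scan resolve an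
-- overlapping/recreated match differently (both results are defensible).
def pvBadPats : List (List Char) :=
  ["cudaMallocudaFree".toList, "cudaMallocudaMemcpy".toList,
   "cudaMallocudaDeviceSynchronize".toList, "cudaMallocudaError_t".toList,
   "cudaMallocudaSuccess".toList, "cudaError_threadIdx".toList]

-- Pre_ excludes strings containing one of six overlapping-token substrings (e.g.
-- 'cudaMallocudaFree', 'cudaError_threadIdx') on which the order in which A's multi-pass
-- replacement and B's single left-to-right scan consume overlapping or recreated matches
-- is accidental and both results are defensible.
def Pre_cuda_to_hip_py (cuda_source : String) : Prop :=
  ∀ p ∈ pvBadPats, ¬ p <:+: cuda_source.toList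

instance (cuda_source : String) : Decidable (Pre_cuda_to_hip_py cuda_source) := by
  unfold Pre_cuda_to_hip_py; infer_instance

def pvWitness_cuda_to_hip_py : String :=
  "cudaMalloc(&p); threadIdx.x;"

def Spec_cuda_to_hip_py (cuda_source : String) (out : String) : Prop := out = cuda_to_hip_py_alt cuda_source
instance (cuda_source : String) (out : String) : Decidable (Spec_cuda_to_hip_py cuda_source out) := by unfold Spec_cuda_to_hip_py; infer_instance

-- ===== CLAIM (what is proved, stated in full; the proofs are below) =====
def Claim_equal_cuda_to_hip_py : Prop := ∀ (cuda_source : String), Dom_cuda_to_hip_py cuda_source → Pre_cuda_to_hip_py cuda_source → Spec_cuda_to_hip_py cuda_source (cuda_to_hip_py cuda_source)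

-- ===== LEMMAS AND PROOFS =====

-- A's str.replace, as structural recursion (proved equal to PySem.Chars.replace below)
def rep (k v : List Char) (s : List Char) : List Char :=
  match s with
  | [] => []
  | c :: t => if k ≠ [] ∧ k <+: (c :: t) then v ++ rep k v ((c :: t).drop k.length)
              else c :: rep k v t
termination_by s.length
decreasing_by
  · rename_i h
    have h1 : 1 ≤ k.length := List.length_pos_iff.mpr h.1
    have h2 : k.length ≤ (c :: t).length := h.2.length_le
    simp at h2 ⊢; omega
  · simp

def repAll (L : List (List Char × List Char)) (s : List Char) : List Char :=
  L.foldl (fun acc kv => rep kv.1 kv.2 acc) s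

theorem rep_nil (k v : List Char) : rep k v [] = [] := by rw [rep]

theorem rep_pos {k : List Char} (v : List Char) {s : List Char} (hk : k ≠ []) (hp : k <+: s) :
    rep k v s = v ++ rep k v (s.drop k.length) := by
  cases s with
  | nil => exact absurd (List.prefix_nil.mp hp) hk
  | cons c t => rw [rep]; simp [hk, hp]

theorem rep_neg {k : List Char} (v : List Char) {c : Char} {t : List Char}
    (h : ¬ k <+: (c :: t)) : rep k v (c :: t) = c :: rep k v t := by
  rw [rep]; simp [h]

theorem prefix_append_cases {w x y : List Char} (h : w <+: x ++ y) : w <+: x ∨ x <+: w := by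
  by_cases hl : w.length ≤ x.length
  · exact Or.inl (List.prefix_of_prefix_length_le h (List.prefix_append x y) hl)
  · exact Or.inr (List.prefix_of_prefix_length_le (List.prefix_append x y) h (by omega))

theorem prefix_drop_eq {k u : List Char} (h : k <+: u) : k ++ u.drop k.length = u := by
  obtain ⟨t, rfl⟩ := h
  rw [List.drop_left]

theorem rep_prefix_split {k v : List Char} (hk : k ≠ []) :
    ∀ s w, w <+: rep k v s →
      w <+: s ∨ ∃ a b, w = a ++ b ∧ b ≠ [] ∧ (b <+: v ∨ v <+: b) ∧ (a ++ k) <+: s := by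
  suffices H : ∀ n s, s.length ≤ n → ∀ w, w <+: rep k v s →
      w <+: s ∨ ∃ a b, w = a ++ b ∧ b ≠ [] ∧ (b <+: v ∨ v <+: b) ∧ (a ++ k) <+: s by
    exact fun s => H s.length s le_rfl
  intro n
  induction n with
  | zero =>
    intro s hs w hw
    have : s = [] := List.length_eq_zero_iff.mp (Nat.le_zero.mp hs)
    subst this
    rw [rep_nil] at hw
    exact Or.inl hw
  | succ n ih =>
    intro s hs w hw
    cases s with
    | nil =>
      rw [rep_nil] at hw
      exact Or.inl hw
    | cons c t =>
      by_cases hkp : k <+: (c :: t)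
      · rw [rep_pos v hk hkp] at hw
        cases w with
        | nil => exact Or.inl List.nil_prefix
        | cons cw w' =>
          refine Or.inr ⟨[], cw :: w', by simp, by simp, ?_, by simpa using hkp⟩
          rcases prefix_append_cases hw with h | h
          · exact Or.inl h
          · exact Or.inr h
      · rw [rep_neg v hkp] at hw
        cases w with
        | nil => exact Or.inl (List.nil_prefix)
        | cons cw w' =>
          rw [List.cons_prefix_cons] at hw
          obtain ⟨rfl, hw'⟩ := hw
          rcases ih t (by simpa using hs) w' hw' with h | ⟨a, b, rfl, hbne, hbv, hak⟩
          · exact Or.inl (List.cons_prefix_cons.mpr ⟨rfl, h⟩)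
          · exact Or.inr ⟨cw :: a, b, by simp, hbne, hbv,
              List.cons_prefix_cons.mpr ⟨rfl, hak⟩⟩

theorem prefix_rep_elim {k v w : List Char} (hk : k ≠ [])
    (hfin : ∀ b ∈ w.tails, b ≠ [] → ¬ b <+: v ∧ ¬ v <+: b)
    {u : List Char} (h : w <+: rep k v u) : w <+: u := by
  rcases rep_prefix_split hk u w h with h' | ⟨a, b, rfl, hbne, hbv, -⟩
  · exact h'
  · exact absurd hbv (by
      have := hfin b ((List.mem_tails ..).mpr (List.suffix_append a b)) hbne
      tauto)

theorem infix_append_cases {P v X : List Char} (h : P <:+: v ++ X) :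
    P <:+: v ∨ P <:+: X ∨ ∃ w, w ≠ [] ∧ w <:+ v ∧ w <+: P ∧ P.drop w.length <+: X := by
  obtain ⟨pre, suf, heq⟩ := h
  by_cases h1 : v.length ≤ pre.length
  · -- P lies entirely inside X
    have hpre : pre <+: v ++ X := ⟨P ++ suf, by rw [← heq]; simp⟩
    have hv : v <+: pre := List.prefix_of_prefix_length_le (List.prefix_append v X) hpre h1
    obtain ⟨pre', rfl⟩ := hv
    refine Or.inr (Or.inl ⟨pre', suf, ?_⟩)
    have : v ++ (pre' ++ P ++ suf) = v ++ X := by simpa [List.append_assoc] using heq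
    exact (List.append_cancel_left this)
  · rw [Nat.not_le] at h1
    by_cases h2 : pre.length + P.length ≤ v.length
    · -- P lies entirely inside v
      have hPp : pre ++ P <+: v ++ X := ⟨suf, by rw [← heq]⟩
      have hPv : pre ++ P <+: v :=
        List.prefix_of_prefix_length_le hPp (List.prefix_append v X) (by simpa using h2)
      obtain ⟨rest, hrest⟩ := hPv
      exact Or.inl ⟨pre, rest, by rw [← hrest]⟩
    · rw [Nat.not_le] at h2
      -- P spans the border: w = v.drop pre.length
      have hpre : pre <+: v ++ X := ⟨P ++ suf, by rw [← heq]; simp⟩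
      have hpv : pre <+: v :=
        List.prefix_of_prefix_length_le hpre (List.prefix_append v X) (by omega)
      obtain ⟨w, hw⟩ := hpv
      have hwlen : w.length = v.length - pre.length := by
        have := congrArg List.length hw; simp at this; omega
      have hwne : w ≠ [] := by
        intro hnil; rw [hnil] at hwlen; simp at hwlen; omega
      have hwsuf : w <:+ v := ⟨pre, hw⟩
      -- from heq : pre ++ P ++ suf = v ++ X = pre ++ w ++ X
      have heq2 : P ++ suf = w ++ X := by
        have : pre ++ (P ++ suf) = pre ++ (w ++ X) := by
          rw [← List.append_assoc, heq, ← hw, List.append_assoc]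
        exact List.append_cancel_left this
      have hwP : w <+: P := by
        have hw1 : w <+: P ++ suf := by rw [heq2]; exact List.prefix_append w X
        exact List.prefix_of_prefix_length_le hw1 (List.prefix_append P suf) (by omega)
      obtain ⟨P', hP'⟩ := hwP
      have hPdrop : P.drop w.length = P' := by rw [← hP']; simp
      refine Or.inr (Or.inr ⟨w, hwne, hwsuf, ⟨P', hP'⟩, ?_⟩)
      rw [hPdrop]
      have : w ++ (P' ++ suf) = w ++ X := by
        rw [← List.append_assoc, hP', heq2]
      exact ⟨suf, List.append_cancel_left this⟩

theorem rep_infix_elim {k v P : List Char} (hk : k ≠ []) :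
    ∀ s, P <:+: rep k v s →
      P <:+: s ∨ P <:+: v ∨ (∃ b, b <:+ P ∧ b ≠ [] ∧ (b <+: v ∨ v <+: b)) ∨
      (∃ w u, w ≠ [] ∧ w <:+ v ∧ w <+: P ∧ P.drop w.length <+: rep k v u ∧ (k ++ u) <:+: s) := by
  suffices H : ∀ n s, s.length ≤ n → P <:+: rep k v s →
      P <:+: s ∨ P <:+: v ∨ (∃ b, b <:+ P ∧ b ≠ [] ∧ (b <+: v ∨ v <+: b)) ∨
      (∃ w u, w ≠ [] ∧ w <:+ v ∧ w <+: P ∧ P.drop w.length <+: rep k v u ∧ (k ++ u) <:+: s) by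
    exact fun s => H s.length s le_rfl
  intro n
  induction n with
  | zero =>
    intro s hs hP
    have : s = [] := List.length_eq_zero_iff.mp (Nat.le_zero.mp hs)
    subst this
    rw [rep_nil] at hP
    exact Or.inl hP
  | succ n ih =>
    intro s hs hP
    cases s with
    | nil =>
      rw [rep_nil] at hP
      exact Or.inl hP
    | cons c t =>
      by_cases hkp : k <+: (c :: t)
      · rw [rep_pos v hk hkp] at hP
        set u := (c :: t).drop k.length with hu
        have hsu : k ++ u = c :: t := prefix_drop_eq hkp
        rcases infix_append_cases hP with h | h | ⟨w, hwne, hwv, hwP, hdrop⟩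
        · exact Or.inr (Or.inl h)
        · -- inside the recursive result on u
          have hul : u.length ≤ n := by
            have hk1 : 1 ≤ k.length := List.length_pos_iff.mpr hk
            have := congrArg List.length hsu
            simp at this hs ⊢; omega
          rcases ih u hul h with h' | h' | h' | ⟨w, u', hw1, hw2, hw3, hw4, hw5⟩
          · -- P <:+: u, and u is a suffix of s
            have husuf : u <:+ c :: t := ⟨k, hsu⟩
            exact Or.inl (h'.trans husuf.isInfix)
          · exact Or.inr (Or.inl h')
          · exact Or.inr (Or.inr (Or.inl h'))
          · refine Or.inr (Or.inr (Or.inr ⟨w, u', hw1, hw2, hw3, hw4, ?_⟩))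
            have husuf : u <:+ c :: t := ⟨k, hsu⟩
            exact hw5.trans husuf.isInfix
        · exact Or.inr (Or.inr (Or.inr ⟨w, u, hwne, hwv, hwP, hdrop, ⟨[], [], by simp [hsu]⟩⟩))
      · rw [rep_neg v hkp] at hP
        rcases List.infix_cons_iff.mp hP with h | h
        · -- P is a prefix of c :: rep k v t = rep k v (c :: t)
          have hP' : P <+: rep k v (c :: t) := by rw [rep_neg v hkp]; exact h
          rcases rep_prefix_split hk (c :: t) P hP' with h' | ⟨a, b, rfl, hbne, hbv, -⟩
          · exact Or.inl h'.isInfix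
          · exact Or.inr (Or.inr (Or.inl ⟨b, List.suffix_append a b, hbne, hbv⟩))
        · rcases ih t (by simpa using hs) h with h' | h' | h' | ⟨w, u', hw1, hw2, hw3, hw4, hw5⟩
          · exact Or.inl (h'.trans (List.suffix_cons c t).isInfix)
          · exact Or.inr (Or.inl h')
          · exact Or.inr (Or.inr (Or.inl h'))
          · exact Or.inr (Or.inr (Or.inr ⟨w, u', hw1, hw2, hw3, hw4,
              hw5.trans (List.suffix_cons c t).isInfix⟩))

theorem firstHit_nil_none (L : List (List Char × List Char)) : firstHit L [] = none := by
  induction L with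
  | nil => rfl
  | cons hd tl ih =>
    obtain ⟨k, v⟩ := hd
    by_cases hc : k = []
    · simp [firstHit, hc, ih]
    · have : ¬ (k ≠ [] ∧ k <+: ([] : List Char)) := by
        rintro ⟨h1, h2⟩; exact h1 (List.prefix_nil.mp h2)
      simp only [firstHit, if_neg this]; exact ih

theorem firstHit_none_of {T : List (List Char × List Char)} {s : List Char}
    (h : ∀ kv ∈ T, ¬ kv.1 <+: s) : firstHit T s = none := by
  induction T with
  | nil => rfl
  | cons hd tl ih =>
    obtain ⟨k, v⟩ := hd
    have : ¬ (k ≠ [] ∧ k <+: s) := by rintro ⟨-, h2⟩; exact h (k, v) (by simp) h2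
    simp only [firstHit, if_neg this]
    exact ih (fun kv hm => h kv (by simp [hm]))

theorem firstHit_none_elim {T : List (List Char × List Char)} {s : List Char}
    (h : firstHit T s = none) {kv : List Char × List Char} (hm : kv ∈ T) (hne : kv.1 ≠ []) :
    ¬ kv.1 <+: s := by
  intro hp
  induction T with
  | nil => simp at hm
  | cons hd tl ih =>
    obtain ⟨k, v⟩ := hd
    by_cases hc : k ≠ [] ∧ k <+: s
    · simp [firstHit, hc] at h
    · simp only [firstHit, if_neg hc] at h
      rcases List.mem_cons.mp hm with rfl | hm'
      · exact hc ⟨hne, hp⟩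
      · exact ih h hm'

theorem firstHit_congr {T : List (List Char × List Char)} {s s' : List Char}
    (h : ∀ kv ∈ T, kv.1 <+: s ↔ kv.1 <+: s') : firstHit T s = firstHit T s' := by
  induction T with
  | nil => rfl
  | cons hd tl ih =>
    obtain ⟨k, v⟩ := hd
    have hiff := h (k, v) (by simp)
    simp only [firstHit]
    by_cases hc : k ≠ [] ∧ k <+: s
    · rw [if_pos hc, if_pos ⟨hc.1, hiff.mp hc.2⟩]
    · rw [if_neg hc, if_neg (by rintro ⟨h1, h2⟩; exact hc ⟨h1, hiff.mpr h2⟩)]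
      exact ih (fun kv hm => h kv (by simp [hm]))

theorem scan_nil (L : List (List Char × List Char)) : scan L [] = [] := by
  rw [scan]; split
  · next kv heq => rw [firstHit_nil_none] at heq; cases heq
  · rfl

theorem scan_pos {L : List (List Char × List Char)} {s : List Char}
    {kv : List Char × List Char} (h : firstHit L s = some kv) :
    scan L s = kv.2 ++ scan L (s.drop kv.1.length) := by
  rw [scan]; split
  · next kv' heq => rw [h] at heq; cases heq; rfl
  · next heq => rw [h] at heq; cases heq

theorem scan_neg {L : List (List Char × List Char)} {c : Char} {t : List Char}
    (h : firstHit L (c :: t) = none) : scan L (c :: t) = c :: scan L t := by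
  rw [scan]; split
  · next kv' heq => rw [h] at heq; cases heq
  · rfl

theorem scan_nil_table (s : List Char) : scan [] s = s := by
  induction s with
  | nil => exact scan_nil []
  | cons c t ih => rw [scan_neg rfl, ih]

theorem scan_pass {T : List (List Char × List Char)} {v X : List Char}
    (h : ∀ w ∈ v.tails, w ≠ [] → firstHit T (w ++ X) = none) :
    scan T (v ++ X) = v ++ scan T X := by
  induction v with
  | nil => simp
  | cons c v' ih =>
    have h0 : firstHit T ((c :: v') ++ X) = none :=
      h (c :: v') ((List.mem_tails ..).mpr (List.suffix_refl _)) (by simp)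
    have h0' : firstHit T (c :: (v' ++ X)) = none := by simpa using h0
    rw [List.cons_append, scan_neg h0',
        ih (fun w hw hne => h w ((List.mem_tails ..).mpr (((List.mem_tails ..).mp hw).trans (List.suffix_cons c v'))) hne)]
    simp

theorem rep_copy {k v : List Char} :
    ∀ (κ u : List Char), (∀ i, i < κ.length → ¬ k <+: (κ ++ u).drop i) →
      rep k v (κ ++ u) = κ ++ rep k v u := by
  intro κ
  induction κ with
  | nil => intro u _; simp
  | cons c κ' ih =>
    intro u hno
    have h0 : ¬ k <+: (c :: (κ' ++ u)) := by
      have := hno 0 (by simp)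
      simpa using this
    rw [List.cons_append, rep_neg _ h0, ih u (fun i hi => by
      have := hno (i + 1) (by simp; omega)
      simpa using this)]
    rfl

-- ===== the central lemma: one replace pass commutes out of the scan =====
theorem scanComm {k v : List Char} {T : List (List Char × List Char)} (hk : k ≠ [])
    (hTne : ∀ kv ∈ T, kv.1 ≠ [])
    (hnpT : ∀ kv ∈ T, ∀ kv' ∈ T, kv.1 <+: kv'.1 → kv.1 = kv'.1)
    (hF1 : ∀ kv ∈ T, ∀ b ∈ kv.1.tail.tails, b ≠ [] → ¬ b <+: v ∧ ¬ v <+: b) :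
    ∀ s : List Char,
      (∀ u, u <:+ s → ∀ kv ∈ T, kv.1 <+: u → ∀ i, 0 < i → i < kv.1.length → ¬ k <+: u.drop i) →
      (∀ u, u <:+ s → k <+: u → ∀ w ∈ v.tails, w ≠ [] → ∀ kv ∈ T,
          ¬ kv.1 <+: (w ++ rep k v (u.drop k.length))) →
      scan ((k, v) :: T) s = scan T (rep k v s) := by
  suffices H : ∀ n s, s.length ≤ n →
      (∀ u, u <:+ s → ∀ kv ∈ T, kv.1 <+: u → ∀ i, 0 < i → i < kv.1.length → ¬ k <+: u.drop i) →
      (∀ u, u <:+ s → k <+: u → ∀ w ∈ v.tails, w ≠ [] → ∀ kv ∈ T,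
          ¬ kv.1 <+: (w ++ rep k v (u.drop k.length))) →
      scan ((k, v) :: T) s = scan T (rep k v s) by
    exact fun s => H s.length s le_rfl
  intro n
  induction n with
  | zero =>
    intro s hs _ _
    have : s = [] := List.length_eq_zero_iff.mp (Nat.le_zero.mp hs)
    subst this
    rw [rep_nil, scan_nil, scan_nil]
  | succ n ih =>
    intro s hs hc1 hc2
    cases s with
    | nil => rw [rep_nil, scan_nil, scan_nil]
    | cons c t =>
      by_cases hkp : k <+: (c :: t)
      · -- case A: k matches at position 0
        set u := (c :: t).drop k.length with hu
        have hk1 : 1 ≤ k.length := List.length_pos_iff.mpr hk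
        have hsu : k ++ u = c :: t := prefix_drop_eq hkp
        have husuf : u <:+ c :: t := ⟨k, hsu⟩
        have hul : u.length ≤ n := by
          have := congrArg List.length hsu
          simp at this hs ⊢; omega
        have hfh : firstHit ((k, v) :: T) (c :: t) = some (k, v) := by
          simp only [firstHit, if_pos (⟨hk, hkp⟩ : k ≠ [] ∧ k <+: (c :: t))]
        have hlhs : scan ((k, v) :: T) (c :: t) = v ++ scan ((k, v) :: T) u :=
          scan_pos hfh
        have hrep : rep k v (c :: t) = v ++ rep k v u := rep_pos v hk hkp
        have hpass : scan T (v ++ rep k v u) = v ++ scan T (rep k v u) := by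
          apply scan_pass
          intro w hw hwne
          apply firstHit_none_of
          intro kv hm
          exact hc2 (c :: t) (List.suffix_refl _) hkp w hw hwne kv hm
        have hih : scan ((k, v) :: T) u = scan T (rep k v u) :=
          ih u hul (fun u' hu' => hc1 u' (hu'.trans husuf))
                   (fun u' hu' => hc2 u' (hu'.trans husuf))
        rw [hlhs, hrep, hpass, hih]
      · -- case B: k does not match at position 0
        have hfh0 : firstHit ((k, v) :: T) (c :: t) = firstHit T (c :: t) := by
          simp only [firstHit, if_neg (by rintro ⟨-, h2⟩; exact hkp h2 :
            ¬ (k ≠ [] ∧ k <+: (c :: t)))]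
        cases hft : firstHit T (c :: t) with
        | none =>
          -- no key matches at all at position 0
          have hlhs : scan ((k, v) :: T) (c :: t) = c :: scan ((k, v) :: T) t :=
            scan_neg (hfh0.trans hft)
          have hrep : rep k v (c :: t) = c :: rep k v t := rep_neg v hkp
          have hnone : firstHit T (c :: rep k v t) = none := by
            apply firstHit_none_of
            intro kv hm hq
            have hκne := hTne kv hm
            cases hκ : kv.1 with
            | nil => exact hκne hκ
            | cons cκ τ =>
              rw [hκ, List.cons_prefix_cons] at hq
              obtain ⟨rfl, hτ⟩ := hq
              cases τ with
              | nil =>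
                -- single-character key would already match the original string
                exact firstHit_none_elim hft hm hκne
                  (by rw [hκ]; exact List.cons_prefix_cons.mpr ⟨rfl, List.nil_prefix⟩)
              | cons cτ τ' =>
                rcases rep_prefix_split hk t (cτ :: τ') hτ with h' | ⟨a, b, heq, hbne, hbv, -⟩
                · exact firstHit_none_elim hft hm hκne
                    (by rw [hκ]; exact List.cons_prefix_cons.mpr ⟨rfl, h'⟩)
                · have hb : b ∈ kv.1.tail.tails := by
                    rw [hκ]; simp only [List.tail_cons]
                    exact (List.mem_tails ..).mpr (heq ▸ List.suffix_append a b)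
                  have := hF1 kv hm b hb hbne
                  tauto
          have hih : scan ((k, v) :: T) t = scan T (rep k v t) :=
            ih t (by simpa using hs)
              (fun u' hu' => hc1 u' (hu'.trans (List.suffix_cons c t)))
              (fun u' hu' => hc2 u' (hu'.trans (List.suffix_cons c t)))
          rw [hlhs, hrep, scan_neg hnone, hih]
        | some kv₀ =>
          -- some key of T matches first at position 0
          obtain ⟨hκne, hκp, hκmem⟩ := firstHit_some_spec hft
          set κ := kv₀.1 with hκdef
          set u := (c :: t).drop κ.length with hu
          have hsu : κ ++ u = c :: t := prefix_drop_eq hκp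
          have husuf : u <:+ c :: t := ⟨κ, hsu⟩
          have hκ1 : 1 ≤ κ.length := List.length_pos_iff.mpr hκne
          have hul : u.length ≤ n := by
            have := congrArg List.length hsu
            simp at this hs ⊢; omega
          -- rep copies κ verbatim
          have hcopy : rep k v (c :: t) = κ ++ rep k v u := by
            rw [← hsu]
            apply rep_copy
            intro i hi
            rcases Nat.eq_zero_or_pos i with rfl | hipos
            · simpa [hsu] using hkp
            · have := hc1 (c :: t) (List.suffix_refl _) kv₀ hκmem hκp i hipos hi
              rw [← hsu] at this
              exact this
          -- first hit of T on κ ++ Z is kv₀, for any Z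
          have hiff : ∀ Z, ∀ kv ∈ T, (kv.1 <+: κ ++ Z ↔ kv.1 <+: c :: t) := by
            intro Z kv hm
            have key : ∀ Z', kv.1 <+: κ ++ Z' ↔ (kv.1 <+: κ ∨ κ <+: kv.1) := by
              intro Z'
              constructor
              · exact prefix_append_cases
              · rintro (h | h)
                · exact h.trans (List.prefix_append κ Z')
                · rw [← hnpT kv₀ hκmem kv hm h]
                  exact List.prefix_append κ Z'
            rw [key Z, ← hsu, key u]
          have hfhZ : firstHit T (κ ++ rep k v u) = some kv₀ := by
            rw [firstHit_congr (fun kv hm => hiff (rep k v u) kv hm)]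
            exact hft
          have hlhs : scan ((k, v) :: T) (c :: t) = kv₀.2 ++ scan ((k, v) :: T) u :=
            scan_pos (hfh0.trans hft)
          have hrhs : scan T (κ ++ rep k v u) = kv₀.2 ++ scan T (rep k v u) := by
            rw [scan_pos hfhZ, List.drop_left]
          have hih : scan ((k, v) :: T) u = scan T (rep k v u) :=
            ih u hul (fun u' hu' => hc1 u' (hu'.trans husuf))
                     (fun u' hu' => hc2 u' (hu'.trans husuf))
          rw [hlhs, hcopy, hrhs, hih]

-- stage lemma: all side conditions decidable (no overlaps at all between k and T)
theorem comm_dec {k v : List Char} {T : List (List Char × List Char)} (hk : k ≠ [])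
    (hTne : ∀ kv ∈ T, kv.1 ≠ [])
    (hnpT : ∀ kv ∈ T, ∀ kv' ∈ T, kv.1 <+: kv'.1 → kv.1 = kv'.1)
    (hF1 : ∀ kv ∈ T, ∀ b ∈ kv.1.tail.tails, b ≠ [] → ¬ b <+: v ∧ ¬ v <+: b)
    (hd1 : ∀ kv ∈ T, ∀ i ∈ List.range kv.1.length, 0 < i →
        ¬ k <+: kv.1.drop i ∧ ¬ kv.1.drop i <+: k)
    (hd2 : ∀ w ∈ v.tails, w ≠ [] → ∀ kv ∈ T, ¬ kv.1 <+: w ∧ ¬ w <+: kv.1) :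
    ∀ s : List Char, scan ((k, v) :: T) s = scan T (rep k v s) := by
  intro s
  apply scanComm hk hTne hnpT hF1
  · intro u _ kv hm hp i h0 hi hcontra
    obtain ⟨u', rfl⟩ : ∃ u', kv.1 ++ u' = u := hp
    rw [List.drop_append_of_le_length (by omega)] at hcontra
    rcases prefix_append_cases hcontra with hc | hc
    · exact (hd1 kv hm i (List.mem_range.mpr (by simpa using hi)) h0).1 hc
    · exact (hd1 kv hm i (List.mem_range.mpr (by simpa using hi)) h0).2 hc
  · intro u _ _ w hw hwne kv hm hcontra
    rcases prefix_append_cases hcontra with hc | hc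
    · exact (hd2 w hw hwne kv hm).1 hc
    · exact (hd2 w hw hwne kv hm).2 hc


-- stage lemma with one possible key-overlap, which would force the pattern p into s
theorem comm_pat {k v p : List Char} {T : List (List Char × List Char)} (hk : k ≠ [])
    (hTne : ∀ kv ∈ T, kv.1 ≠ [])
    (hnpT : ∀ kv ∈ T, ∀ kv' ∈ T, kv.1 <+: kv'.1 → kv.1 = kv'.1)
    (hF1 : ∀ kv ∈ T, ∀ b ∈ kv.1.tail.tails, b ≠ [] → ¬ b <+: v ∧ ¬ v <+: b)
    (hd1 : ∀ kv ∈ T, ∀ i ∈ List.range kv.1.length, 0 < i →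
        ¬ k <+: kv.1.drop i ∧ (kv.1.drop i <+: k → kv.1.take i ++ k = p))
    (hd2 : ∀ w ∈ v.tails, w ≠ [] → ∀ kv ∈ T, ¬ kv.1 <+: w ∧ ¬ w <+: kv.1)
    {s : List Char} (hp : ¬ p <:+: s) :
    scan ((k, v) :: T) s = scan T (rep k v s) := by
  apply scanComm hk hTne hnpT hF1
  · intro u hu kv hm hpre i h0 hi hcontra
    have hir : i ∈ List.range kv.1.length := List.mem_range.mpr hi
    obtain ⟨u', rfl⟩ : ∃ u', kv.1 ++ u' = u := hpre
    rw [List.drop_append_of_le_length (by omega)] at hcontra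
    rcases prefix_append_cases hcontra with hc | hc
    · exact (hd1 kv hm i hir h0).1 hc
    · -- the overlap: p occurs in u, hence in s
      have hpat : kv.1.take i ++ k = p := (hd1 kv hm i hir h0).2 hc
      apply hp
      have h1 : kv.1.take i ++ k <+: kv.1.take i ++ (kv.1.drop i ++ u') :=
        (List.prefix_append_right_inj _).mpr hcontra
      rw [← List.append_assoc, List.take_append_drop] at h1
      rw [hpat] at h1
      exact (h1.isInfix).trans hu.isInfix
  · intro u _ _ w hw hwne kv hm hcontra
    rcases prefix_append_cases hcontra with hc | hc
    · exact (hd2 w hw hwne kv hm).1 hc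
    · exact (hd2 w hw hwne kv hm).2 hc

-- concrete data for the two non-clean stages
def kMal : List Char := "cudaMalloc".toList
def vMal : List Char := "hipMalloc".toList
def patET : List Char := "cudaError_threadIdx".toList
def patME : List Char := "cudaMallocudaError_t".toList

-- stage 1: the 'c' that 'hipMalloc' re-creates is harmless on Pre_-safe strings
theorem c2_stage1 {s : List Char} (hS : ∀ q ∈ pvBadPats, ¬ q <:+: s) :
    ∀ u, u <:+ s → kMal <+: u → ∀ w ∈ vMal.tails, w ≠ [] → ∀ kv ∈ hipPairs.drop 1,
      ¬ kv.1 <+: (w ++ rep kMal vMal (u.drop kMal.length)) := by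
  intro u hu hkp w hw hwne kv hm hcontra
  rcases prefix_append_cases hcontra with hc | hc
  · revert hc
    exact (by decide : ∀ w ∈ vMal.tails, w ≠ [] → ∀ kv ∈ hipPairs.drop 1, ¬ kv.1 <+: w)
      w hw hwne kv hm
  · have hwc : w = ['c'] :=
      (by decide : ∀ w ∈ vMal.tails, w ≠ [] → ∀ kv ∈ hipPairs.drop 1, w <+: kv.1 → w = ['c'])
        w hw hwne kv hm hc
    subst hwc
    obtain ⟨cκ, τ, hκ⟩ : ∃ cκ τ, kv.1 = cκ :: τ := by
      cases hκ : kv.1 with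
      | nil => rw [hκ] at hc; simp at hc
      | cons a b => exact ⟨a, b, rfl⟩
    rw [hκ, List.singleton_append, List.cons_prefix_cons] at hcontra
    obtain ⟨rfl, hτ⟩ := hcontra
    have hfin : ∀ b ∈ τ.tails, b ≠ [] → ¬ b <+: vMal ∧ ¬ vMal <+: b := by
      have := (by decide :
        ∀ kv ∈ hipPairs.drop 1, ∀ b ∈ kv.1.tail.tails, b ≠ [] → ¬ b <+: vMal ∧ ¬ vMal <+: b)
        kv hm
      rw [hκ] at this; simpa using this
    have hτu : τ <+: u.drop kMal.length := prefix_rep_elim (by decide) hfin hτ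
    have hbadmem : (kMal ++ τ) ∈ pvBadPats := by
      have := (by decide :
        ∀ kv ∈ hipPairs.drop 1, ['c'] <+: kv.1 → (kMal ++ kv.1.tail) ∈ pvBadPats)
        kv hm (by rw [hκ]; exact List.cons_prefix_cons.mpr ⟨rfl, List.nil_prefix⟩)
      rw [hκ] at this; simpa using this
    have hbad : kMal ++ τ <+: u := by
      rw [← prefix_drop_eq hkp]
      exact (List.prefix_append_right_inj kMal).mpr hτu
    exact hS (kMal ++ τ) hbadmem (hbad.isInfix.trans hu.isInfix)

theorem comm_one {s : List Char} (hS : ∀ q ∈ pvBadPats, ¬ q <:+: s) :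
    scan hipPairs s = scan (hipPairs.drop 1) (rep kMal vMal s) := by
  have hshape : hipPairs = (kMal, vMal) :: hipPairs.drop 1 := by rfl
  rw [hshape]
  apply scanComm (by decide) (by decide) (by decide) (by decide)
  · intro u _ kv hm hpre i h0 hi hcontra
    obtain ⟨u', rfl⟩ : ∃ u', kv.1 ++ u' = u := hpre
    rw [List.drop_append_of_le_length (by omega)] at hcontra
    have hir : i ∈ List.range kv.1.length := List.mem_range.mpr hi
    rcases prefix_append_cases hcontra with hc | hc
    · exact (by decide : ∀ kv ∈ hipPairs.drop 1, ∀ i ∈ List.range kv.1.length, 0 < i →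
        ¬ kMal <+: kv.1.drop i ∧ ¬ kv.1.drop i <+: kMal) kv hm i hir h0 |>.1 hc
    · exact (by decide : ∀ kv ∈ hipPairs.drop 1, ∀ i ∈ List.range kv.1.length, 0 < i →
        ¬ kMal <+: kv.1.drop i ∧ ¬ kv.1.drop i <+: kMal) kv hm i hir h0 |>.2 hc
  · exact c2_stage1 hS

-- no replace pass of stages 2..6 can create the pattern P
theorem nc_dec {k v P : List Char} (hk : k ≠ [])
    (h2 : ¬ P <:+: v)
    (h3 : ∀ b ∈ P.tails, b ≠ [] → ¬ b <+: v ∧ ¬ v <+: b)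
    (h4 : ∀ w ∈ v.tails, w ≠ [] → ¬ w <+: P)
    {s : List Char} (hP : ¬ P <:+: s) : ¬ P <:+: rep k v s := by
  intro hc
  rcases rep_infix_elim hk s hc with h | h | ⟨b, hb, hbne, hbv⟩ | ⟨w, u, hw1, hw2, hw3, -, -⟩
  · exact hP h
  · exact h2 h
  · exact absurd hbv (by
      have := h3 b ((List.mem_tails ..).mpr hb) hbne; tauto)
  · exact h4 w ((List.mem_tails ..).mpr hw2) hw1 hw3

-- stage 1 cannot create 'cudaError_threadIdx' on Pre_-safe strings
theorem nc_one {s : List Char} (hP : ¬ patET <:+: s) (hB : ¬ patME <:+: s) :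
    ¬ patET <:+: rep kMal vMal s := by
  intro hc
  rcases rep_infix_elim (by decide) s hc with h | h | ⟨b, hb, hbne, hbv⟩ | ⟨w, u, hw1, hw2, hw3, hw4, hw5⟩
  · exact hP h
  · exact absurd h (by decide)
  · exact absurd hbv (by
      have := (by decide : ∀ b ∈ patET.tails, b ≠ [] → ¬ b <+: vMal ∧ ¬ vMal <+: b)
        b ((List.mem_tails ..).mpr hb) hbne
      tauto)
  · have hwc : w = ['c'] :=
      (by decide : ∀ w ∈ vMal.tails, w ≠ [] → w <+: patET → w = ['c'])
        w ((List.mem_tails ..).mpr hw2) hw1 hw3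
    subst hwc
    have hQ : patET.drop 1 <+: u :=
      prefix_rep_elim (by decide)
        (by decide : ∀ b ∈ (patET.drop 1).tails, b ≠ [] → ¬ b <+: vMal ∧ ¬ vMal <+: b) hw4
    have h6 : kMal ++ patET.drop 1 <+: kMal ++ u :=
      (List.prefix_append_right_inj kMal).mpr hQ
    have h7 : patME <+: kMal ++ patET.drop 1 := by decide
    exact hB ((h7.trans h6).isInfix.trans hw5)

-- ===== bridge: PySem.Chars.replace = rep for a nonempty pattern =====
theorem go_eq {old new : List Char} (ho : old ≠ []) :
    ∀ fuel l acc, l.length ≤ fuel →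
      PySem.Chars.replace.go old new fuel l acc = acc.reverse ++ rep old new l := by
  intro fuel
  induction fuel with
  | zero =>
    intro l acc hl
    have : l = [] := List.length_eq_zero_iff.mp (Nat.le_zero.mp hl)
    subst this
    simp [PySem.Chars.replace.go, rep_nil]
  | succ n ih =>
    intro l acc hl
    cases l with
    | nil => simp [PySem.Chars.replace.go, rep_nil]
    | cons c t =>
      by_cases hp : old.isPrefixOf (c :: t)
      · have hp' : old <+: c :: t := List.isPrefixOf_iff_prefix.mp hp
        have ho1 : 1 ≤ old.length := List.length_pos_iff.mpr ho
        have hl2 : ((c :: t).drop old.length).length ≤ n := by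
          have := hp'.length_le
          simp at hl ⊢; omega
        simp only [PySem.Chars.replace.go, if_pos hp]
        rw [ih _ _ hl2, rep_pos new ho hp']
        simp
      · have hp' : ¬ old <+: c :: t := fun hx => hp (List.isPrefixOf_iff_prefix.mpr hx)
        simp only [PySem.Chars.replace.go, if_neg hp]
        rw [ih t (c :: acc) (by simpa using hl), rep_neg new hp']
        simp

theorem chars_replace_eq (s old new : List Char) (ho : old ≠ []) :
    PySem.Chars.replace s old new = rep old new s := by
  unfold PySem.Chars.replace
  rw [if_neg (by simp [ho]), go_eq ho s.length s [] le_rfl]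
  simp

-- ===== assembling the equivalence =====
theorem aport_chars (s : String) :
    (cuda_to_hip_py s).toList = repAll hipPairs s.toList := by
  simp only [cuda_to_hip_py, hipReplacements, List.foldl, repAll, hipPairs,
    PySem.Str.toList_replace]
  repeat rw [chars_replace_eq]
  all_goals decide

theorem bport_chars (s : String) :
    (cuda_to_hip_py_alt s).toList = scan hipPairs s.toList := by
  simp [cuda_to_hip_py_alt, String.toList_ofList]

theorem main_eq {s : List Char} (hS : ∀ q ∈ pvBadPats, ¬ q <:+: s) :
    scan hipPairs s = repAll hipPairs s := by
  -- the eleven replace passes, peeled off the scan one at a time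
  have e2 : ∀ x, scan (hipPairs.drop 1) x =
      scan (hipPairs.drop 2) (rep "cudaFree".toList "hipFree".toList x) := by
    intro x
    rw [show hipPairs.drop 1 = ("cudaFree".toList, "hipFree".toList) :: hipPairs.drop 2 from rfl]
    exact comm_dec (by decide) (by decide) (by decide) (by decide) (by decide) (by decide) x
  have e3 : ∀ x, scan (hipPairs.drop 2) x =
      scan (hipPairs.drop 3) (rep "cudaMemcpy".toList "hipMemcpy".toList x) := by
    intro x
    rw [show hipPairs.drop 2 = ("cudaMemcpy".toList, "hipMemcpy".toList) :: hipPairs.drop 3 from rfl]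
    exact comm_dec (by decide) (by decide) (by decide) (by decide) (by decide) (by decide) x
  have e4 : ∀ x, scan (hipPairs.drop 3) x =
      scan (hipPairs.drop 4) (rep "cudaDeviceSynchronize".toList "hipDeviceSynchronize".toList x) := by
    intro x
    rw [show hipPairs.drop 3 = ("cudaDeviceSynchronize".toList, "hipDeviceSynchronize".toList) :: hipPairs.drop 4 from rfl]
    exact comm_dec (by decide) (by decide) (by decide) (by decide) (by decide) (by decide) x
  have e5 : ∀ x, scan (hipPairs.drop 4) x =
      scan (hipPairs.drop 5) (rep "blockIdx".toList "hipBlockIdx".toList x) := by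
    intro x
    rw [show hipPairs.drop 4 = ("blockIdx".toList, "hipBlockIdx".toList) :: hipPairs.drop 5 from rfl]
    exact comm_dec (by decide) (by decide) (by decide) (by decide) (by decide) (by decide) x
  have e6 : ∀ x, scan (hipPairs.drop 5) x =
      scan (hipPairs.drop 6) (rep "blockDim".toList "hipBlockDim".toList x) := by
    intro x
    rw [show hipPairs.drop 5 = ("blockDim".toList, "hipBlockDim".toList) :: hipPairs.drop 6 from rfl]
    exact comm_dec (by decide) (by decide) (by decide) (by decide) (by decide) (by decide) x
  have e8 : ∀ x, scan (hipPairs.drop 7) x =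
      scan (hipPairs.drop 8) (rep "gridDim".toList "hipGridDim".toList x) := by
    intro x
    rw [show hipPairs.drop 7 = ("gridDim".toList, "hipGridDim".toList) :: hipPairs.drop 8 from rfl]
    exact comm_dec (by decide) (by decide) (by decide) (by decide) (by decide) (by decide) x
  have e9 : ∀ x, scan (hipPairs.drop 8) x =
      scan (hipPairs.drop 9) (rep "__syncthreads".toList "__syncthreads".toList x) := by
    intro x
    rw [show hipPairs.drop 8 = ("__syncthreads".toList, "__syncthreads".toList) :: hipPairs.drop 9 from rfl]
    exact comm_dec (by decide) (by decide) (by decide) (by decide) (by decide) (by decide) x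
  have e10 : ∀ x, scan (hipPairs.drop 9) x =
      scan (hipPairs.drop 10) (rep "cudaError_t".toList "hipError_t".toList x) := by
    intro x
    rw [show hipPairs.drop 9 = ("cudaError_t".toList, "hipError_t".toList) :: hipPairs.drop 10 from rfl]
    exact comm_dec (by decide) (by decide) (by decide) (by decide) (by decide) (by decide) x
  have e11 : ∀ x, scan (hipPairs.drop 10) x =
      scan (hipPairs.drop 11) (rep "cudaSuccess".toList "hipSuccess".toList x) := by
    intro x
    rw [show hipPairs.drop 10 = ("cudaSuccess".toList, "hipSuccess".toList) :: hipPairs.drop 11 from rfl]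
    exact comm_dec (by decide) (by decide) (by decide) (by decide) (by decide) (by decide) x
  -- the pattern 'cudaError_threadIdx' stays absent through stages 1..6
  have np1 : ¬ patET <:+: s := hS patET (by decide)
  have np2 := nc_one np1 (hS patME (by decide))
  have np3 := nc_dec (k := "cudaFree".toList) (v := "hipFree".toList) (P := patET)
    (by decide) (by decide) (by decide) (by decide) np2
  have np4 := nc_dec (k := "cudaMemcpy".toList) (v := "hipMemcpy".toList) (P := patET)
    (by decide) (by decide) (by decide) (by decide) np3
  have np5 := nc_dec (k := "cudaDeviceSynchronize".toList) (v := "hipDeviceSynchronize".toList) (P := patET)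
    (by decide) (by decide) (by decide) (by decide) np4
  have np6 := nc_dec (k := "blockIdx".toList) (v := "hipBlockIdx".toList) (P := patET)
    (by decide) (by decide) (by decide) (by decide) np5
  have np7 := nc_dec (k := "blockDim".toList) (v := "hipBlockDim".toList) (P := patET)
    (by decide) (by decide) (by decide) (by decide) np6
  -- stage 7 (threadIdx) uses the absence of the pattern
  have e7 : scan (hipPairs.drop 6)
        (rep "blockDim".toList "hipBlockDim".toList
          (rep "blockIdx".toList "hipBlockIdx".toList
            (rep "cudaDeviceSynchronize".toList "hipDeviceSynchronize".toList
              (rep "cudaMemcpy".toList "hipMemcpy".toList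
                (rep "cudaFree".toList "hipFree".toList (rep kMal vMal s)))))) =
      scan (hipPairs.drop 7)
        (rep "threadIdx".toList "hipThreadIdx".toList
          (rep "blockDim".toList "hipBlockDim".toList
            (rep "blockIdx".toList "hipBlockIdx".toList
              (rep "cudaDeviceSynchronize".toList "hipDeviceSynchronize".toList
                (rep "cudaMemcpy".toList "hipMemcpy".toList
                  (rep "cudaFree".toList "hipFree".toList (rep kMal vMal s))))))) := by
    rw [show hipPairs.drop 6 = ("threadIdx".toList, "hipThreadIdx".toList) :: hipPairs.drop 7 from rfl]
    exact comm_pat (p := patET) (by decide) (by decide) (by decide) (by decide)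
      (by decide) (by decide) np7
  calc scan hipPairs s
      = scan (hipPairs.drop 1) (rep kMal vMal s) := comm_one hS
    _ = _ := by
        rw [e2, e3, e4, e5, e6, e7, e8, e9, e10, e11]
        rw [show hipPairs.drop 11 = ([] : List (List Char × List Char)) from rfl,
          scan_nil_table]
        rfl

-- ===== VERDICT (by name: the statement is the Claim_ definition above) =====
theorem cuda_to_hip_py_spec : Claim_equal_cuda_to_hip_py := by
  intro s _ hpre
  unfold Spec_cuda_to_hip_py
  apply String.toList_inj.mp
  rw [aport_chars, bport_chars, main_eq]
  exact fun q hq => hpre q hq
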